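-- pv_equiv track=rewrite | github.com/somya-anchalia/dsa-problems | Assessment practise/6_assessment_HR(Amz).py | processQueriesOnCart
-- ===== SOURCE A (Python) =====
-- def processQueriesOnCart(items, query):
--     cart = items[:]
--
--     for q in query:
--         if q > 0:
--             cart.append(q)
--         else:
--             if -q in cart:
--                 cart.remove(-q)
--
--     return cart
-- ===== SOURCE B (Python) =====
-- def processQueriesOnCart(items, query):
--     # One pass over queries with per-value counters (count so far / successful
--     # removes), then one pass over items+added keeping each value's survivors.
--     cnt = {}
--     for x in items:
--         cnt[x] = cnt.get(x, 0) + 1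
--     added = []
--     dead = {}
--     for q in query:
--         if q > 0:
--             cnt[q] = cnt.get(q, 0) + 1
--             added.append(q)
--         else:
--             v = -q
--             if dead.get(v, 0) < cnt.get(v, 0):
--                 dead[v] = dead.get(v, 0) + 1
--     out = []
--     seen = {}
--     for x in items + added:
--         s = seen.get(x, 0)
--         if s < dead.get(x, 0):
--             seen[x] = s + 1
--         else:
--             out.append(x)
--     return out
-- ===== Notes on version B (the rewrite author's own statement) =====
-- stated objective: faster
-- what changed: Replaces A's per-query linear membership scan and list.remove over the cart with per-value counters (occurrences so far vs. successful removes) in dicts, then a single output pass that skips the first dead[v] occurrences of each value v.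
import Mathlib
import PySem

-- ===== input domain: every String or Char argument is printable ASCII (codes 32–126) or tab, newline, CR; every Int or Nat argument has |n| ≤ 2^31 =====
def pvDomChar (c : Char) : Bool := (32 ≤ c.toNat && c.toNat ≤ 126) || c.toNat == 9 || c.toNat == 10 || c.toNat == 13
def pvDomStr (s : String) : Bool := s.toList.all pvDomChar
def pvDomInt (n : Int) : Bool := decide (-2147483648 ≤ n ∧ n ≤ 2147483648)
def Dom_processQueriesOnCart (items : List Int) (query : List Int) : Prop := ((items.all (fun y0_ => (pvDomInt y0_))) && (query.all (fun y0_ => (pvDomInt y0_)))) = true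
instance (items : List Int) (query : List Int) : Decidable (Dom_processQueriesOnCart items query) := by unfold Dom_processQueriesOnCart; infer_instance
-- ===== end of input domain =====

-- B replaces A's repeated linear `in`/`remove` scans of the cart by per-value counters
-- (dict passes over the queries and the item sequence); return value only (A does not mutate its arguments).

-- ===== PORT A =====
-- one loop iteration of A: append positive q, else remove first occurrence of -q if present
def pvStepA (cart : List Int) (q : Int) : List Int :=
  if q > 0 then cart ++ [q]
  else if cart.contains (-q) then (PySem.List.remove? cart (-q)).getD cart
  else cart

def processQueriesOnCart (items : List Int) (query : List Int) : List Int :=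
  query.foldl pvStepA items

-- ===== PORT B =====
-- Source B's counters are Python ints that never go negative; ported as Nat (value-exact here)
-- query-loop body of Source B; state: (added, cnt, dead)
def pvStepB (st : List Int × PySem.Dict Int Nat × PySem.Dict Int Nat) (q : Int) :
    List Int × PySem.Dict Int Nat × PySem.Dict Int Nat :=
  if q > 0 then (st.1 ++ [q], st.2.1.insert q (st.2.1.getD q 0 + 1), st.2.2)
  else if st.2.2.getD (-q) 0 < st.2.1.getD (-q) 0 then
    (st.1, st.2.1, st.2.2.insert (-q) (st.2.2.getD (-q) 0 + 1))
  else st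

-- output-loop body of Source B: skip the first dead[x] occurrences of each x
def pvFinStep (dead : PySem.Dict Int Nat) (acc : List Int × PySem.Dict Int Nat) (x : Int) :
    List Int × PySem.Dict Int Nat :=
  if acc.2.getD x 0 < dead.getD x 0 then (acc.1, acc.2.insert x (acc.2.getD x 0 + 1))
  else (acc.1 ++ [x], acc.2)

def processQueriesOnCart_alt (items : List Int) (query : List Int) : List Int :=
  let cnt0 : PySem.Dict Int Nat :=
    items.foldl (fun d x => d.insert x (d.getD x 0 + 1)) PySem.Dict.empty
  let st := query.foldl pvStepB ([], cnt0, PySem.Dict.empty)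
  let seq := items ++ st.1
  (seq.foldl (pvFinStep st.2.2) ([], PySem.Dict.empty)).1

-- ===== PRECONDITION & SPEC =====
def Spec_processQueriesOnCart (items : List Int) (query : List Int) (out : List Int) : Prop := out = processQueriesOnCart_alt items query
instance (items : List Int) (query : List Int) (out : List Int) : Decidable (Spec_processQueriesOnCart items query out) := by unfold Spec_processQueriesOnCart; infer_instance

-- ===== CLAIM (what is proved, stated in full; the proofs are below) =====
def Claim_equal_processQueriesOnCart : Prop := ∀ (items : List Int) (query : List Int), Dom_processQueriesOnCart items query → Spec_processQueriesOnCart items query (processQueriesOnCart items query)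

-- ===== LEMMAS AND PROOFS =====

-- model: remove, for every value v, the first (d v) occurrences of v from s
def pvRc : List Int → (Int → Nat) → List Int
  | [], _ => []
  | x :: xs, d =>
    if d x = 0 then x :: pvRc xs d
    else pvRc xs (fun v => if v = x then d v - 1 else d v)

lemma pvRc_zero (s : List Int) (d : Int → Nat) (h : ∀ v, d v = 0) : pvRc s d = s := by
  induction s with
  | nil => rfl
  | cons x xs ih => simp [pvRc, h, ih]

-- the two ways the demand function is cut down to the tail of the list
lemma pvTail (x : Int) (xs : List Int) (d : Int → Nat)
    (hb : ∀ w, d w ≤ (x :: xs).count w) (hx : d x = 0) : ∀ w, d w ≤ xs.count w := by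
  intro w
  have h := hb w
  by_cases hw : w = x
  · subst hw; simp [hx]
  · have hw' : x ≠ w := fun h' => hw h'.symm
    simpa [List.count_cons, hw'] using h

lemma pvTailDec (x : Int) (xs : List Int) (d : Int → Nat)
    (hb : ∀ w, d w ≤ (x :: xs).count w) :
    ∀ w, (if w = x then d w - 1 else d w) ≤ xs.count w := by
  intro w
  have h := hb w
  by_cases hw : w = x
  · subst hw
    simp at h
    rw [if_pos rfl]
    omega
  · have hw' : x ≠ w := fun h' => hw h'.symm
    simp only [if_neg hw]
    simpa [List.count_cons, hw'] using h

lemma pvRc_append (s : List Int) (q : Int) (d : Int → Nat)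
    (hb : ∀ v, d v ≤ s.count v) : pvRc (s ++ [q]) d = pvRc s d ++ [q] := by
  induction s generalizing d with
  | nil =>
    have hq := hb q
    simp only [List.count_nil, Nat.le_zero] at hq
    simp [pvRc, hq]
  | cons x xs ih =>
    by_cases hx : d x = 0
    · simp only [List.cons_append, pvRc, hx, if_true]
      rw [ih _ (pvTail x xs d hb hx)]
    · simp only [List.cons_append, pvRc, hx, if_false]
      exact ih _ (pvTailDec x xs d hb)

lemma pvMem_rc (s : List Int) (d : Int → Nat) (v : Int)
    (hb : ∀ w, d w ≤ s.count w) : v ∈ pvRc s d ↔ d v < s.count v := by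
  induction s generalizing d with
  | nil => simp [pvRc]
  | cons x xs ih =>
    by_cases hx : d x = 0
    · simp only [pvRc, hx, if_true, List.mem_cons]
      rw [ih d (pvTail x xs d hb hx)]
      by_cases hv : v = x
      · subst hv; simp [hx]
      · have hv' : x ≠ v := fun h' => hv h'.symm
        simp [hv, hv']
    · simp only [pvRc, hx, if_false]
      rw [ih _ (pvTailDec x xs d hb)]
      by_cases hv : v = x
      · subst hv
        rw [if_pos rfl, List.count_cons_self]
        omega
      · have hv' : x ≠ v := fun h' => hv h'.symm
        simp [hv, hv']

lemma pvRc_cons_zero (x : Int) (xs : List Int) (d : Int → Nat) (h : d x = 0) :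
    pvRc (x :: xs) d = x :: pvRc xs d := by simp [pvRc, h]

lemma pvRc_cons_pos (x : Int) (xs : List Int) (d : Int → Nat) (h : d x ≠ 0) :
    pvRc (x :: xs) d = pvRc xs (fun v => if v = x then d v - 1 else d v) := by simp [pvRc, h]

lemma pvRc_bump (s : List Int) (d : Int → Nat) (v : Int)
    (hb : ∀ w, d w ≤ s.count w) (hv : d v < s.count v) :
    pvRc s (fun w => if w = v then d w + 1 else d w) = (pvRc s d).erase v := by
  induction s generalizing d with
  | nil => simp [List.count_nil] at hv
  | cons x xs ih =>
    by_cases hx : d x = 0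
    · by_cases hvx : v = x
      · subst hvx
        -- head survives under d and equals v: the bumped demand eats the head
        rw [pvRc_cons_zero v xs d hx, List.erase_cons_head,
          pvRc_cons_pos v xs _ (by simp)]
        congr 1
        funext w
        by_cases hw : w = v
        · simp [hw, hx]
        · simp [hw]
      · -- head survives, different value: head kept on both sides
        have hxv : x ≠ v := fun h' => hvx h'.symm
        rw [pvRc_cons_zero x xs d hx,
          pvRc_cons_zero x xs _ (by simp [hxv, hx]),
          List.erase_cons_tail (by simp [hxv]),
          ih d (pvTail x xs d hb hx) (by have := hv; simpa [List.count_cons, hxv] using this)]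
    · by_cases hvx : v = x
      · -- head already consumed by d on both sides; bump and decrement cancel
        subst hvx
        rw [pvRc_cons_pos v xs d hx, pvRc_cons_pos v xs _ (by simp)]
        have hd : (fun w => if w = v then (if w = v then d w + 1 else d w) - 1 else (if w = v then d w + 1 else d w)) = d := by
          funext w
          by_cases hw : w = v <;> simp [hw]
        rw [hd]
        have hv' : (if v = v then d v - 1 else d v) < xs.count v := by
          rw [if_pos rfl]
          rw [List.count_cons_self] at hv
          omega
        have h2 := ih (fun w => if w = v then d w - 1 else d w) (pvTailDec v xs d hb) hv'
        have hbd : (fun w => if w = v then (if w = v then d w - 1 else d w) + 1 else (if w = v then d w - 1 else d w)) = d := by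
          funext w
          by_cases hw : w = v
          · subst hw; simp; omega
          · simp [hw]
        rw [hbd] at h2
        exact h2
      · -- head consumed, different value: decrement at x commutes with bump at v
        have hxv : x ≠ v := fun h' => hvx h'.symm
        rw [pvRc_cons_pos x xs d hx, pvRc_cons_pos x xs _ (by simpa [hxv] using hx)]
        have hv' : (if v = x then d v - 1 else d v) < xs.count v := by
          rw [if_neg hvx]
          have := hv
          simpa [List.count_cons, hxv] using this
        have h2 := ih (fun w => if w = x then d w - 1 else d w) (pvTailDec x xs d hb) hv'
        have hcomm : (fun w => if w = v then (if w = x then d w - 1 else d w) + 1 else (if w = x then d w - 1 else d w)) = (fun w => if w = x then (if w = v then d w + 1 else d w) - 1 else (if w = v then d w + 1 else d w)) := by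
          funext w
          by_cases hw : w = v
          · subst hw; simp [hvx]
          · by_cases hwx : w = x <;> simp [hw, hwx, hxv]
        rw [hcomm] at h2
        exact h2

-- counting pass of Source B builds exact multiplicities
lemma pvCnt_foldl (l : List Int) (d : PySem.Dict Int Nat) (v : Int) :
    (l.foldl (fun d x => d.insert x (d.getD x 0 + 1)) d).getD v 0 = d.getD v 0 + l.count v := by
  induction l generalizing d with
  | nil => simp
  | cons x xs ih =>
    simp only [List.foldl_cons, ih, PySem.Dict.getD_insert, List.count_cons]
    by_cases hw : v = x
    · subst hw; simp; omega
    · have hw' : x ≠ v := fun h' => hw h'.symm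
      simp [hw, hw']

-- invariant-carrying main loop: A's cart is pvRc of B's (seq, dead) state
lemma pvLoop (items0 : List Int) (query : List Int) :
    ∀ (added : List Int) (cnt dead : PySem.Dict Int Nat),
    (∀ v, cnt.getD v 0 = (items0 ++ added).count v) →
    (∀ v, dead.getD v 0 ≤ (items0 ++ added).count v) →
    query.foldl pvStepA (pvRc (items0 ++ added) (fun v => dead.getD v 0)) =
      pvRc (items0 ++ (query.foldl pvStepB (added, cnt, dead)).1)
        (fun v => (query.foldl pvStepB (added, cnt, dead)).2.2.getD v 0) := by
  induction query with
  | nil => intro added cnt dead _ _; rfl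
  | cons q qs ih =>
    intro added cnt dead hcnt hdead
    simp only [List.foldl_cons]
    by_cases hq : q > 0
    · have hstepA : pvStepA (pvRc (items0 ++ added) (fun v => dead.getD v 0)) q
          = pvRc (items0 ++ (added ++ [q])) (fun v => dead.getD v 0) := by
        rw [pvStepA, if_pos hq, ← pvRc_append _ _ _ hdead, List.append_assoc]
      have hstepB : pvStepB (added, cnt, dead) q
          = (added ++ [q], cnt.insert q (cnt.getD q 0 + 1), dead) := by
        simp [pvStepB, hq]
      rw [hstepA, hstepB]
      apply ih
      · intro v
        rw [PySem.Dict.getD_insert]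
        by_cases hv : v = q
        · subst hv
          simp [← List.append_assoc, List.count_append, hcnt v]
        · simp [hv, Ne.symm hv, hcnt v, ← List.append_assoc, List.count_append]
      · intro v
        calc dead.getD v 0 ≤ (items0 ++ added).count v := hdead v
          _ ≤ (items0 ++ (added ++ [q])).count v := by
              simp [← List.append_assoc, List.count_append]
    · by_cases hlt : dead.getD (-q) 0 < cnt.getD (-q) 0
      · have hv : dead.getD (-q) 0 < (items0 ++ added).count (-q) := by
          rw [← hcnt]; exact hlt
        have hmem : (-q) ∈ pvRc (items0 ++ added) (fun v => dead.getD v 0) :=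
          (pvMem_rc _ _ _ hdead).mpr hv
        have hstepA : pvStepA (pvRc (items0 ++ added) (fun v => dead.getD v 0)) q
            = pvRc (items0 ++ added)
                (fun v => (dead.insert (-q) (dead.getD (-q) 0 + 1)).getD v 0) := by
          rw [pvStepA, if_neg hq, if_pos (by simpa [List.contains_iff_mem] using hmem)]
          rw [PySem.List.remove?_eq_some_erase _ _ hmem, Option.getD_some]
          rw [← pvRc_bump _ _ _ hdead hv]
          congr 1
          funext w
          rw [PySem.Dict.getD_insert]
          by_cases hw : w = -q <;> simp [hw]
        have hstepB : pvStepB (added, cnt, dead) q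
            = (added, cnt, dead.insert (-q) (dead.getD (-q) 0 + 1)) := by
          simp [pvStepB, hq, hlt]
        rw [hstepA, hstepB]
        apply ih _ _ _ hcnt
        intro v
        rw [PySem.Dict.getD_insert]
        by_cases hw : v = -q
        · subst hw; rw [if_pos rfl]; omega
        · rw [if_neg hw]; exact hdead v
      · have hstepB : pvStepB (added, cnt, dead) q = (added, cnt, dead) := by
          simp [pvStepB, hq, hlt]
        have hnmem : (-q) ∉ pvRc (items0 ++ added) (fun v => dead.getD v 0) := by
          rw [pvMem_rc _ _ _ hdead, ← hcnt]
          omega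
        have hstepA : pvStepA (pvRc (items0 ++ added) (fun v => dead.getD v 0)) q
            = pvRc (items0 ++ added) (fun v => dead.getD v 0) := by
          rw [pvStepA, if_neg hq, if_neg (by simpa [List.contains_iff_mem] using hnmem)]
        rw [hstepA, hstepB]
        exact ih _ _ _ hcnt hdead
    
-- the output pass of Source B computes pvRc of the remaining demand
lemma pvFin (dead : PySem.Dict Int Nat) (s : List Int) :
    ∀ (out : List Int) (seen : PySem.Dict Int Nat),
    (∀ v, seen.getD v 0 ≤ dead.getD v 0) →
    (s.foldl (pvFinStep dead) (out, seen)).1 =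
      out ++ pvRc s (fun v => dead.getD v 0 - seen.getD v 0) := by
  induction s with
  | nil => intro out seen _; simp [pvRc]
  | cons x xs ih =>
    intro out seen hle
    simp only [List.foldl_cons]
    by_cases hx : seen.getD x 0 < dead.getD x 0
    · have hstep : pvFinStep dead (out, seen) x = (out, seen.insert x (seen.getD x 0 + 1)) := by
        simp [pvFinStep, hx]
      rw [hstep, ih out _ (by
        intro v
        rw [PySem.Dict.getD_insert]
        by_cases hv : v = x
        · subst hv; simp; omega
        · simp [hv, hle v])]
      have hnz : dead.getD x 0 - seen.getD x 0 ≠ 0 := by omega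
      rw [pvRc, if_neg hnz]
      congr 2
      funext w
      rw [PySem.Dict.getD_insert]
      by_cases hw : w = x
      · subst hw; simp; omega
      · simp [hw]
    · have hstep : pvFinStep dead (out, seen) x = (out ++ [x], seen) := by
        simp [pvFinStep, hx]
      have hz : dead.getD x 0 - seen.getD x 0 = 0 := by omega
      rw [hstep, ih (out ++ [x]) seen hle, pvRc, if_pos hz, List.append_assoc,
        List.singleton_append]

-- ===== VERDICT (by name: the statement is the Claim_ definition above) =====
theorem processQueriesOnCart_spec : Claim_equal_processQueriesOnCart := by
  intro items query _
  unfold Spec_processQueriesOnCart processQueriesOnCart processQueriesOnCart_alt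
  simp only []
  have hcnt0 : ∀ v, (items.foldl (fun d x => d.insert x (d.getD x 0 + 1)) PySem.Dict.empty).getD v 0
      = (items ++ ([] : List Int)).count v := by
    intro v; rw [pvCnt_foldl]; simp
  have hdead0 : ∀ v, (PySem.Dict.empty : PySem.Dict Int Nat).getD v 0
      ≤ (items ++ ([] : List Int)).count v := by
    intro v; simp
  have hA := pvLoop items query [] _ _ hcnt0 hdead0
  rw [pvRc_zero _ _ (by intro v; simp), List.append_nil] at hA
  rw [hA, pvFin _ _ [] PySem.Dict.empty (by intro v; simp)]
  simp
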